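-- pv_equiv track=rewrite | github.com/titusjkl/TexasHoldemHandParser | hh_parser_v2.py | order_pos
-- ===== SOURCE A (Python) =====
-- def order_pos(btn_seat, seats_names_dict):
--     no_seats = len(seats_names_dict)
--
--     if no_seats == 3:
--         pos_names = ["Button", "BigBlind", "SmallBlind"]
--         pos_order = [btn_seat, btn_seat-1, btn_seat-2]
--     elif no_seats == 4:
--         pos_names = ["Button", "CutOff", "BigBlind", "SmallBlind"]
--         pos_order = [btn_seat, btn_seat-1, btn_seat-2, btn_seat-3]
--     elif no_seats == 5:
--         pos_names = ["Button", "CutOff", "Hijack", "BigBlind", "SmallBlind"]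
--         pos_order = [btn_seat, btn_seat-1, btn_seat-2, btn_seat-3, btn_seat-4]
--     else:
--         pos_names = ["Button", "CutOff", "Hijack", "Lojack", "BigBlind", "SmallBlind"]
--         pos_order = [btn_seat, btn_seat-1, btn_seat-2, btn_seat-3, btn_seat-4, btn_seat-5]
--
--     pos_ordered = [pos_names[i] for i in pos_order]
--
--     return pos_ordered
-- ===== SOURCE B (Python) =====
-- def order_pos(btn_seat, seats_names_dict):
--     n = len(seats_names_dict)
--     count = n if 3 <= n <= 5 else 6
--     # Positions listed directly in clockwise (reverse-of-deal) order,
--     # then rotated by slicing so the sequence starts at the button.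
--     rev = ["SmallBlind", "BigBlind"] + ["Lojack", "Hijack", "CutOff"][6 - count:] + ["Button"]
--     k = (count - 1 - btn_seat) % count
--     return rev[k:] + rev[:k]
-- ===== Notes on version B (the rewrite author's own statement) =====
-- stated objective: simpler
-- what changed: Instead of building a size-dependent names list per branch and indexing it at btn_seat, btn_seat-1, ... (relying on negative-index wraparound), B writes the positions once in reversed (clockwise) order and rotates that list into place with two slices after one modular computation of the rotation offset.
import Mathlib
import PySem

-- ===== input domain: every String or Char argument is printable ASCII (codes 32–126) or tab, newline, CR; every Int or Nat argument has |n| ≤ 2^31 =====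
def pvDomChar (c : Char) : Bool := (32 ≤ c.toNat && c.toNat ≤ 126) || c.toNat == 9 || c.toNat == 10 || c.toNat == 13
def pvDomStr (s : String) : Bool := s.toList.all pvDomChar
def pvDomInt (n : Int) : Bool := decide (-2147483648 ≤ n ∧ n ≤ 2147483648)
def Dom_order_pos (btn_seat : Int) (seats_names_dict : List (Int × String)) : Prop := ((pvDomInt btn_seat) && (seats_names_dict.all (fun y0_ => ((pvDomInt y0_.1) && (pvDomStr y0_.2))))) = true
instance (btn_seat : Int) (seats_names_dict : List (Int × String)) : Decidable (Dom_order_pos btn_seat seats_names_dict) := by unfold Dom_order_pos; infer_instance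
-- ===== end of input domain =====

-- B replaces A's branch-built names list and descending index comprehension by a direct
-- clockwise (reversed) position list rotated into place with two slices; objective: simpler.


-- ===== PORT A =====
-- Python's pos_names[i] raises IndexError when pyGet? = none; those inputs are outside Pre_,
-- so the .getD "" default is never reached on claimed inputs.
def order_pos (btn_seat : Int) (seats_names_dict : List (Int × String)) : List String :=
  let no_seats := seats_names_dict.length
  let pn :=
    if no_seats = 3 then
      ((["Button", "BigBlind", "SmallBlind"] : List String),
       [btn_seat, btn_seat - 1, btn_seat - 2])
    else if no_seats = 4 then
      ((["Button", "CutOff", "BigBlind", "SmallBlind"] : List String),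
       [btn_seat, btn_seat - 1, btn_seat - 2, btn_seat - 3])
    else if no_seats = 5 then
      ((["Button", "CutOff", "Hijack", "BigBlind", "SmallBlind"] : List String),
       [btn_seat, btn_seat - 1, btn_seat - 2, btn_seat - 3, btn_seat - 4])
    else
      ((["Button", "CutOff", "Hijack", "Lojack", "BigBlind", "SmallBlind"] : List String),
       [btn_seat, btn_seat - 1, btn_seat - 2, btn_seat - 3, btn_seat - 4, btn_seat - 5])
  pn.2.map (fun i => (PySem.List.pyGet? pn.1 i).getD "")

-- ===== PORT B =====
-- rev[6-count:] and the two rotation slices via PySem.List.slice (Python-exact).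
def order_pos_alt (btn_seat : Int) (seats_names_dict : List (Int × String)) : List String :=
  let n := seats_names_dict.length
  let count : Int := if 3 ≤ n ∧ n ≤ 5 then (n : Int) else 6
  let rev := ["SmallBlind", "BigBlind"]
      ++ PySem.List.slice (["Lojack", "Hijack", "CutOff"] : List String) (some (6 - count)) none
      ++ ["Button"]
  let k := PySem.Int.mod (count - 1 - btn_seat) count
  PySem.List.slice rev (some k) none ++ PySem.List.slice rev none (some k)

-- ===== PRECONDITION & SPEC =====
-- Pre_ excludes exactly the inputs on which Python A raises IndexError
-- (btn_seat outside [-1, count-1]); B's modular rotation returns a value there.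
def Pre_order_pos (btn_seat : Int) (seats_names_dict : List (Int × String)) : Prop :=
  -1 ≤ btn_seat ∧
    btn_seat ≤ (if 3 ≤ seats_names_dict.length ∧ seats_names_dict.length ≤ 5
                then (seats_names_dict.length : Int) else 6) - 1
instance (btn_seat : Int) (seats_names_dict : List (Int × String)) : Decidable (Pre_order_pos btn_seat seats_names_dict) := by unfold Pre_order_pos; infer_instance

def pvWitness_order_pos : Int × (List (Int × String)) := (2, [(1, "a"), (2, "b"), (3, "c")])

def Spec_order_pos (btn_seat : Int) (seats_names_dict : List (Int × String)) (out : List String) : Prop := out = order_pos_alt btn_seat seats_names_dict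
instance (btn_seat : Int) (seats_names_dict : List (Int × String)) (out : List String) : Decidable (Spec_order_pos btn_seat seats_names_dict out) := by unfold Spec_order_pos; infer_instance

-- ===== CLAIM (what is proved, stated in full; the proofs are below) =====
def Claim_equal_order_pos : Prop := ∀ (btn_seat : Int) (seats_names_dict : List (Int × String)), Dom_order_pos btn_seat seats_names_dict → Pre_order_pos btn_seat seats_names_dict → Spec_order_pos btn_seat seats_names_dict (order_pos btn_seat seats_names_dict)

-- ===== LEMMAS AND PROOFS =====

-- ===== VERDICT (by name: the statement is the Claim_ definition above) =====
theorem order_pos_spec : Claim_equal_order_pos := by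
  intro b d _ hpre
  unfold Pre_order_pos at hpre
  unfold Spec_order_pos order_pos order_pos_alt
  by_cases h3 : d.length = 3
  · simp only [h3] at hpre ⊢
    norm_num at hpre ⊢
    obtain ⟨h1, h2⟩ := hpre
    interval_cases b <;> decide
  · by_cases h4 : d.length = 4
    · simp only [h4] at hpre ⊢
      norm_num at hpre ⊢
      obtain ⟨h1, h2⟩ := hpre
      interval_cases b <;> decide
    · by_cases h5 : d.length = 5
      · simp only [h5] at hpre ⊢
        norm_num at hpre ⊢
        obtain ⟨h1, h2⟩ := hpre
        interval_cases b <;> decide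
      · have hc : ¬ (3 ≤ d.length ∧ d.length ≤ 5) := by omega
        simp only [h3, h4, h5, hc, if_false] at hpre ⊢
        obtain ⟨h1, h2⟩ := hpre
        interval_cases b <;> decide
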